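-- pv_equiv track=rewrite | github.com/OmkarKawthekar/Question_paper_generator | app.py | format_questions_to_sections
-- ===== SOURCE A (Python) =====
-- from typing import Dict, List, Tuple
--
-- def format_questions_to_sections(questions: List[Dict]) -> List[Tuple[str, List[Dict]]]:
--     """Create simple sections by marks value, for nicer paper structure."""
--     by_marks: Dict[int, List[Dict]] = {}
--     for q in questions:
--         by_marks.setdefault(int(q["marks"]), []).append(q)
--     sections: List[Tuple[str, List[Dict]]] = []
--     for marks in sorted(by_marks.keys()):
--         title = f"Section: {marks} Mark Questions"
--         sections.append((title, by_marks[marks]))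
--     return sections
-- ===== SOURCE B (Python) =====
-- from typing import Dict, List, Tuple
--
-- def format_questions_to_sections(questions: List[Dict]) -> List[Tuple[str, List[Dict]]]:
--     """Stable-sort by marks once, then group adjacent equal-marks runs."""
--     qs = sorted(questions, key=lambda q: int(q["marks"]))
--     sections: List[Tuple[str, List[Dict]]] = []
--     i, n = 0, len(qs)
--     while i < n:
--         m = int(qs[i]["marks"])
--         j = i + 1
--         while j < n and int(qs[j]["marks"]) == m:
--             j += 1
--         sections.append((f"Section: {m} Mark Questions", qs[i:j]))
--         i = j
--     return sections
-- ===== Notes on version B (the rewrite author's own statement) =====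
-- stated objective: alternative
-- what changed: Replaces the dict-of-lists aggregation plus key sort by one stable sort on int(q["marks"]) followed by a single linear pass grouping adjacent equal-marks runs, keeping no hash table.
import Mathlib
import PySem

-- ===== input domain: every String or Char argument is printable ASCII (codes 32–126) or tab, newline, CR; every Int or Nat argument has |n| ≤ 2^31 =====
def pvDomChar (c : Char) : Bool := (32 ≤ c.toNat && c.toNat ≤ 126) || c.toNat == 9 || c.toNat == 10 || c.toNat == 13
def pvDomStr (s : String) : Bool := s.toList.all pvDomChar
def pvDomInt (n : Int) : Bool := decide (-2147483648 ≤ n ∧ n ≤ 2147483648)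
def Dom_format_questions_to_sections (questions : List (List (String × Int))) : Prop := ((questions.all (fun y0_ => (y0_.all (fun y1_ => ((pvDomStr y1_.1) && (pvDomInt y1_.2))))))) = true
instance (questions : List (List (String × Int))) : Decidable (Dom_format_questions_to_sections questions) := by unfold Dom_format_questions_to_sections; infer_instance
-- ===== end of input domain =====

-- B replaces A's dict-of-lists aggregation + key sort by one stable sort on marks followed by a
-- linear grouping of adjacent equal-marks runs (alternative decomposition, no hash table kept).

-- ===== PORT A =====
-- q["marks"] (first-match lookup; Pre_ guarantees the key exists); int() on an int is the identity
def pvMarks (q : List (String × Int)) : Int := (PySem.Dict.mk q).getD "marks" 0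
-- the f-string "Section: {m} Mark Questions" (str(m) = PySem.Int.toChars, exact)
def pvTitle (m : Int) : String := String.ofList ("Section: ".toList ++ PySem.Int.toChars m ++ " Mark Questions".toList)

def format_questions_to_sections (questions : List (List (String × Int))) : List (String × (List (List (String × Int)))) :=
  -- by_marks.setdefault(int(q["marks"]), []).append(q)  ==  modify key [] (· ++ [q])
  let by_marks : PySem.Dict Int (List (List (String × Int))) :=
    questions.foldl (fun d q => d.modify (pvMarks q) [] (fun v => v ++ [q])) PySem.Dict.empty
  (PySem.List.sorted by_marks.keys (fun k => k)).foldl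
    (fun sections m => sections ++ [(pvTitle m, by_marks.getD m [])]) []

-- ===== PORT B =====
-- the outer while loop of Source B: peel off the run of the head's marks value, recurse on the rest
def pvRuns (l : List (List (String × Int))) : List (String × (List (List (String × Int)))) :=
  match l with
  | [] => []
  | q :: rest =>
    (pvTitle (pvMarks q), q :: rest.takeWhile (fun r => pvMarks r == pvMarks q)) ::
      pvRuns (rest.dropWhile (fun r => pvMarks r == pvMarks q))
termination_by l.length
decreasing_by
  simp only [List.length_cons]
  exact Nat.lt_succ_of_le (List.dropWhile_sublist _).length_le

def format_questions_to_sections_alt (questions : List (List (String × Int))) : List (String × (List (List (String × Int)))) :=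
  pvRuns (PySem.List.sorted questions pvMarks)

-- ===== PRECONDITION & SPEC =====
-- Pre_ excludes questions lacking a "marks" key, on which the Python A raises KeyError.
def Pre_format_questions_to_sections (questions : List (List (String × Int))) : Prop :=
  ∀ q ∈ questions, (PySem.Dict.mk q).contains "marks" = true
instance (questions : List (List (String × Int))) : Decidable (Pre_format_questions_to_sections questions) := by unfold Pre_format_questions_to_sections; infer_instance
def pvWitness_format_questions_to_sections : (List (List (String × Int))) :=
  [[("marks", 2)], [("marks", 1), ("id", 7)], [("marks", 2), ("id", 8)]]

def Spec_format_questions_to_sections (questions : List (List (String × Int))) (out : List (String × (List (List (String × Int))))) : Prop := out = format_questions_to_sections_alt questions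
instance (questions : List (List (String × Int))) (out : List (String × (List (List (String × Int))))) : Decidable (Spec_format_questions_to_sections questions out) := by unfold Spec_format_questions_to_sections; infer_instance

-- ===== CLAIM (what is proved, stated in full; the proofs are below) =====
def Claim_equal_format_questions_to_sections : Prop := ∀ (questions : List (List (String × Int))), Dom_format_questions_to_sections questions → Pre_format_questions_to_sections questions → Spec_format_questions_to_sections questions (format_questions_to_sections questions)

-- ===== LEMMAS AND PROOFS =====

-- A's dict lookup after the grouping loop: the group of m is the filter of questions with marks m
lemma pv_getD_by_marks (questions : List (List (String × Int))) (m : Int) :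
    (questions.foldl (fun d q => d.modify (pvMarks q) [] (fun v => v ++ [q])) PySem.Dict.empty).getD m []
      = questions.filter (fun q => pvMarks q == m) := by
  have h := PySem.Dict.getD_foldl_modify_append (questions.map (fun q => (pvMarks q, q)))
      (PySem.Dict.empty (κ := Int) (ν := List (List (String × Int)))) m
  rw [List.foldl_map] at h
  rw [h]
  simp [List.filter_map, Function.comp_def]

-- A in closed form: map over the sorted distinct marks of the per-mark filters
lemma pv_portA_eq (questions : List (List (String × Int))) :
    format_questions_to_sections questions =
      (PySem.List.sorted (PySem.Set.ofList (questions.map pvMarks)) (fun k => k)).map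
        (fun m => (pvTitle m, questions.filter (fun q => pvMarks q == m))) := by
  unfold format_questions_to_sections
  rw [PySem.List.foldl_append_singleton_eq_map, List.nil_append,
    PySem.Dict.keys_foldl_modify_key questions pvMarks [] (fun _ q v => v ++ [q]) PySem.Dict.empty]
  have hupd : PySem.Set.update (PySem.Dict.empty (κ := Int) (ν := List (List (String × Int)))).keys
      (questions.map pvMarks) = PySem.Set.ofList (questions.map pvMarks) := rfl
  rw [hupd]
  exact List.map_congr_left (fun m _ => by rw [pv_getD_by_marks])

-- stability of the sort: filtering one marks value commutes with sorting by marks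
lemma pv_pairwise_insertBy (x : List (String × Int)) (l : List (List (String × Int)))
    (hl : l.Pairwise (fun a b => pvMarks a ≤ pvMarks b)) :
    (PySem.List.insertBy (fun a b => decide (pvMarks a < pvMarks b)) x l).Pairwise
      (fun a b => pvMarks a ≤ pvMarks b) := by
  induction l with
  | nil => simp [PySem.List.insertBy]
  | cons y ys ih =>
    rw [List.pairwise_cons] at hl
    by_cases hb : pvMarks x < pvMarks y
    · simp only [PySem.List.insertBy, hb, decide_true, if_true]
      rw [List.pairwise_cons]
      refine ⟨?_, List.pairwise_cons.mpr hl⟩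
      intro z hz
      rcases List.mem_cons.mp hz with rfl | hz
      · exact le_of_lt hb
      · exact le_of_lt (lt_of_lt_of_le hb (hl.1 z hz))
    · simp only [PySem.List.insertBy, hb, decide_false, Bool.false_eq_true, if_false]
      rw [List.pairwise_cons]
      refine ⟨?_, ih hl.2⟩
      intro z hz
      rcases (PySem.List.mem_insertBy _ _ _ _).mp hz with rfl | hz
      · exact le_of_not_gt hb
      · exact hl.1 z hz

lemma pv_filter_insertBy (m : Int) (x : List (String × Int)) (l : List (List (String × Int)))
    (hl : l.Pairwise (fun a b => pvMarks a ≤ pvMarks b)) :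
    (PySem.List.insertBy (fun a b => decide (pvMarks a < pvMarks b)) x l).filter
        (fun q => pvMarks q == m)
      = l.filter (fun q => pvMarks q == m) ++ if pvMarks x == m then [x] else [] := by
  induction l with
  | nil => simp [PySem.List.insertBy, List.filter_cons]
  | cons y ys ih =>
    rw [List.pairwise_cons] at hl
    by_cases hb : pvMarks x < pvMarks y
    · simp only [PySem.List.insertBy, hb, decide_true, if_true]
      by_cases hx : pvMarks x = m
      · have hempty : (y :: ys).filter (fun q => pvMarks q == m) = [] := by
          apply List.filter_eq_nil_iff.mpr
          intro z hz
          have hyz : pvMarks y ≤ pvMarks z := by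
            rcases List.mem_cons.mp hz with rfl | hz
            · exact le_refl _
            · exact hl.1 z hz
          have : m < pvMarks z := lt_of_lt_of_le (hx ▸ hb) hyz
          simpa using (ne_of_gt this)
        rw [List.filter_cons, hempty]
        simp [hx]
      · have hx' : (pvMarks x == m) = false := by simpa using hx
        simp [List.filter_cons, hx']
    · simp only [PySem.List.insertBy, hb, decide_false, Bool.false_eq_true, if_false]
      rw [List.filter_cons, List.filter_cons, ih hl.2]
      by_cases hy : pvMarks y == m <;> simp [hy]

lemma pv_filter_foldl_insertBy (m : Int) :
    ∀ (l acc : List (List (String × Int))), acc.Pairwise (fun a b => pvMarks a ≤ pvMarks b) →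
    (l.foldl (fun acc x => PySem.List.insertBy (fun a b => decide (pvMarks a < pvMarks b)) x acc) acc).filter
        (fun q => pvMarks q == m)
      = acc.filter (fun q => pvMarks q == m) ++ l.filter (fun q => pvMarks q == m) := by
  intro l
  induction l with
  | nil => intro acc _; simp
  | cons x t ih =>
    intro acc hacc
    rw [List.foldl_cons, ih _ (pv_pairwise_insertBy x acc hacc), pv_filter_insertBy m x acc hacc,
      List.filter_cons]
    by_cases hx : pvMarks x == m <;> simp [hx]

lemma pv_sorted_filter (questions : List (List (String × Int))) (m : Int) :
    (PySem.List.sorted questions pvMarks).filter (fun q => pvMarks q == m)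
      = questions.filter (fun q => pvMarks q == m) := by
  rw [PySem.List.sorted_eq_foldl_insertBy,
    pv_filter_foldl_insertBy m questions [] (by simp)]
  simp

-- set(xs) keeps a subsequence of xs
lemma pv_foldl_add_sublist (xs : List Int) : ∀ (acc : List Int),
    (xs.foldl PySem.Set.add acc).Sublist (acc ++ xs) := by
  induction xs with
  | nil => intro acc; simp
  | cons x t ih =>
    intro acc
    refine (ih (PySem.Set.add acc x)).trans ?_
    unfold PySem.Set.add
    split
    · exact (List.append_sublist_append_left acc).mpr (List.sublist_cons_self x t)
    · rw [List.append_assoc]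
      simp

lemma pv_ofList_pairwise_lt (xs : List Int) (h : xs.Pairwise (· ≤ ·)) :
    (PySem.Set.ofList xs).Pairwise (· < ·) := by
  have hsub : (PySem.Set.ofList xs).Sublist xs := by
    simpa using pv_foldl_add_sublist xs []
  have hle : (PySem.Set.ofList xs).Pairwise (· ≤ ·) := h.sublist hsub
  have hnd : (PySem.Set.ofList xs).Pairwise (· ≠ ·) := PySem.Set.nodup_ofList xs
  exact (hle.and hnd).imp (fun hp => lt_of_le_of_ne hp.1 hp.2)

-- B in closed form on a list already sorted by marks
lemma pv_pvRuns_eq (l : List (List (String × Int)))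
    (hl : l.Pairwise (fun a b => pvMarks a ≤ pvMarks b)) :
    pvRuns l = (PySem.Set.ofList (l.map pvMarks)).map
      (fun m => (pvTitle m, l.filter (fun q => pvMarks q == m))) := by
  induction l using pvRuns.induct with
  | case1 => simp [pvRuns]
  | case2 q rest ih =>
    rw [List.pairwise_cons] at hl
    simp only [pvRuns]
    set m0 := pvMarks q with hm0
    set run := rest.takeWhile (fun r => pvMarks r == m0) with hrundef
    set rest' := rest.dropWhile (fun r => pvMarks r == m0) with hrest'def
    have hsplit : run ++ rest' = rest := List.takeWhile_append_dropWhile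
    have hrun_all : ∀ z ∈ run, pvMarks z = m0 := by
      intro z hz
      simpa using List.mem_takeWhile_imp hz
    have hrest'_pw : rest'.Pairwise (fun a b => pvMarks a ≤ pvMarks b) :=
      hl.2.sublist (List.dropWhile_sublist _)
    have hrest'_gt : ∀ z ∈ rest', m0 < pvMarks z := by
      cases hr' : rest' with
      | nil => intro z hz; exact absurd hz (by simp)
      | cons r t =>
        have hhead := List.head?_dropWhile_not (fun r => pvMarks r == m0) rest
        rw [← hrest'def, hr'] at hhead
        simp only [List.head?_cons] at hhead
        have hr_ne : pvMarks r ≠ m0 := by simpa using hhead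
        have hr_mem : r ∈ rest := (List.dropWhile_sublist _).mem (hr' ▸ List.mem_cons_self ..)
        have hr_gt : m0 < pvMarks r := lt_of_le_of_ne (hl.1 r hr_mem) (Ne.symm hr_ne)
        intro z hz
        rw [hr'] at hrest'_pw
        rcases List.mem_cons.mp hz with rfl | hz
        · exact hr_gt
        · exact lt_of_lt_of_le hr_gt ((List.pairwise_cons.mp hrest'_pw).1 z hz)
    have hfilter0 : (q :: rest).filter (fun q' => pvMarks q' == m0) = q :: run := by
      rw [List.filter_cons, ← hsplit, List.filter_append]
      have h1 : run.filter (fun q' => pvMarks q' == m0) = run :=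
        List.filter_eq_self.mpr (fun z hz => by simpa using hrun_all z hz)
      have h2 : rest'.filter (fun q' => pvMarks q' == m0) = [] :=
        List.filter_eq_nil_iff.mpr (fun z hz => by simpa using ne_of_gt (hrest'_gt z hz))
      simp [h1, h2]
      exact hm0.symm
    have hkeys : PySem.Set.ofList ((q :: rest).map pvMarks)
        = m0 :: PySem.Set.ofList (rest'.map pvMarks) := by
      have hL : (PySem.Set.ofList ((q :: rest).map pvMarks)).Pairwise (fun a b => a ≤ b) :=
        ((pv_ofList_pairwise_lt _ (List.pairwise_map.mpr (List.pairwise_cons.mpr hl))).imp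
          (fun hp => le_of_lt hp))
      have hnotmem : m0 ∉ PySem.Set.ofList (rest'.map pvMarks) := by
        intro hmem
        rcases List.mem_map.mp ((PySem.Set.mem_ofList _ _).mp hmem) with ⟨z, hz, hzeq⟩
        exact absurd hzeq (ne_of_gt (hrest'_gt z hz))
      have hR : (m0 :: PySem.Set.ofList (rest'.map pvMarks)).Pairwise (fun a b => a ≤ b) := by
        rw [List.pairwise_cons]
        refine ⟨?_, (pv_ofList_pairwise_lt _ (List.pairwise_map.mpr hrest'_pw)).imp
          (fun hp => le_of_lt hp)⟩
        intro z hz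
        rcases List.mem_map.mp ((PySem.Set.mem_ofList _ _).mp hz) with ⟨w, hw, hweq⟩
        exact le_of_lt (hweq ▸ hrest'_gt w hw)
      have hperm : (PySem.Set.ofList ((q :: rest).map pvMarks)).Perm
          (m0 :: PySem.Set.ofList (rest'.map pvMarks)) := by
        apply (List.perm_ext_iff_of_nodup (PySem.Set.nodup_ofList _) ?_).mpr
        · intro x
          rw [PySem.Set.mem_ofList]
          constructor
          · intro hx
            rcases List.mem_map.mp hx with ⟨z, hz, hzeq⟩
            rcases List.mem_cons.mp hz with rfl | hz
            · rw [← hzeq]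
              exact List.mem_cons_self
            · rw [← hsplit] at hz
              rcases List.mem_append.mp hz with hz | hz
              · have hx0 : x = m0 := by rw [← hzeq, hrun_all z hz]
                rw [hx0]
                exact List.mem_cons_self
              · exact List.mem_cons_of_mem _ ((PySem.Set.mem_ofList _ _).mpr
                  (List.mem_map.mpr ⟨z, hz, hzeq⟩))
          · intro hx
            rcases List.mem_cons.mp hx with rfl | hx
            · exact List.mem_map.mpr ⟨q, List.mem_cons_self, rfl⟩
            · rcases List.mem_map.mp ((PySem.Set.mem_ofList _ _).mp hx) with ⟨z, hz, hzeq⟩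
              exact List.mem_map.mpr ⟨z, List.mem_cons_of_mem _
                ((hsplit ▸ List.mem_append_right run hz)), hzeq⟩
        · exact List.nodup_cons.mpr ⟨hnotmem, PySem.Set.nodup_ofList _⟩
      exact PySem.List.eq_of_perm_of_pairwise_le_of_injective (fun x => x)
        (fun _ _ h => h) hperm hL hR
    have htail : ∀ m ∈ PySem.Set.ofList (rest'.map pvMarks),
        (q :: rest).filter (fun q' => pvMarks q' == m) = rest'.filter (fun q' => pvMarks q' == m) := by
      intro m hm
      rcases List.mem_map.mp ((PySem.Set.mem_ofList _ _).mp hm) with ⟨z, hz, hzeq⟩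
      have hm_gt : m0 < m := hzeq ▸ hrest'_gt z hz
      rw [List.filter_cons, ← hsplit, List.filter_append]
      have hq0 : (pvMarks q == m) = false := by simpa using ne_of_lt hm_gt
      have hrun0 : run.filter (fun q' => pvMarks q' == m) = [] :=
        List.filter_eq_nil_iff.mpr (fun w hw => by
          simpa [hrun_all w hw] using ne_of_lt hm_gt)
      simp [hq0, hrun0]
    rw [hkeys, List.map_cons, hfilter0, ih hrest'_pw]
    exact congrArg _ (List.map_congr_left (fun m hm => by rw [htail m hm]))

-- ===== VERDICT (by name: the statement is the Claim_ definition above) =====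
theorem format_questions_to_sections_spec : Claim_equal_format_questions_to_sections := by
  intro questions _ _
  unfold Spec_format_questions_to_sections format_questions_to_sections_alt
  rw [pv_portA_eq,
    pv_pvRuns_eq (PySem.List.sorted questions pvMarks)
      (PySem.List.sorted_pairwise questions pvMarks)]
  have hkeys : PySem.List.sorted (PySem.Set.ofList (questions.map pvMarks)) (fun k => k)
      = PySem.Set.ofList ((PySem.List.sorted questions pvMarks).map pvMarks) := by
    apply PySem.List.sorted_eq_of_perm_of_pairwise_lt
    · apply (List.perm_ext_iff_of_nodup (PySem.Set.nodup_ofList _) (PySem.Set.nodup_ofList _)).mpr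
      intro x
      rw [PySem.Set.mem_ofList, PySem.Set.mem_ofList]
      exact ((PySem.List.sorted_perm questions pvMarks false).map pvMarks).mem_iff
    · exact pv_ofList_pairwise_lt _
        (List.pairwise_map.mpr (PySem.List.sorted_pairwise questions pvMarks))
  rw [hkeys]
  exact List.map_congr_left (fun m _ => by rw [pv_sorted_filter])
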